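-- pv_equiv track=rewrite | github.com/YehoMk/TriangleSolverBot | Logic.py | value_check
-- ===== SOURCE A (Python) =====
-- def value_check(value):
--     incorrect_value = False
--     for element in value.replace(".", ""):
--         if element not in ["0", "1", "2", "3", "4", "5", "6", "7", "8", "9"]:
--             incorrect_value = True
--     if value == "0":
--         incorrect_value = True
--     if value.count(".") not in [0, 1]:
--         incorrect_value = True
--     if incorrect_value is False or value == "x":
--         return True
--     else:
--         return False
-- ===== SOURCE B (Python) =====
-- # Hand-compiled DFA for the pattern [0-9]* '.'? [0-9]* (re cannot be imported here):
-- # state 0 = integer part, state 1 = after the dot, state 2 = dead; missing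
-- # transitions fall to the dead state.
-- _DELTA = {(0, "digit"): 0, (0, "dot"): 1, (1, "digit"): 1}
--
--
-- def _classify(ch):
--     if ch in "0123456789":
--         return "digit"
--     if ch == ".":
--         return "dot"
--     return "other"
--
--
-- def value_check(value):
--     if value == "x":
--         return True
--     if value == "0":
--         return False
--     state = 0
--     for ch in value:
--         state = _DELTA.get((state, _classify(ch)), 2)
--         if state == 2:
--             break
--     return state != 2
-- ===== Notes on version B (the rewrite author's own statement) =====
-- stated objective: alternative
-- what changed: Replaces A's flag-setting scan over a dot-stripped copy plus a separate dot-count pass with a table-driven three-state finite automaton (a hand-compiled DFA for the pattern digits, optional dot, digits) run once over the string with early exit on the dead state, after the two literal guards for 'x' and '0'.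
import Mathlib
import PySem

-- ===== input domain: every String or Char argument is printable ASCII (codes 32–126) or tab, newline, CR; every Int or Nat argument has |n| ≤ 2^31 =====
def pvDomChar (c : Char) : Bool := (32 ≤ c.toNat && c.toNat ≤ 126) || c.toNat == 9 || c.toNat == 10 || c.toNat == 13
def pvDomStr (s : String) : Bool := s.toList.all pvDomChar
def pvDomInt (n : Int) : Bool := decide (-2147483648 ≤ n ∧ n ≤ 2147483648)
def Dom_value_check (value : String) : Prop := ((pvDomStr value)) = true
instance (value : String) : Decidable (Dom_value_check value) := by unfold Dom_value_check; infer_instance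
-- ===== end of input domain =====

-- B replaces A's flag-setting scan over value.replace('.','') plus a separate dot-count
-- pass with one run of a table-driven three-state automaton (objective: alternative).

-- ===== PORT A =====
def value_check (value : String) : Bool :=
  let incorrect₀ := false
  let incorrect₁ := (PySem.Str.replace value "." "").toList.foldl
      (fun b c => if (['0','1','2','3','4','5','6','7','8','9'].contains c) then b else true)
      incorrect₀
  let incorrect₂ := if value == "0" then true else incorrect₁
  let incorrect₃ := if (([0, 1] : List Nat).contains (PySem.Str.count value ".")) then incorrect₂ else true
  if incorrect₃ == false || value == "x" then true else false

-- ===== PORT B =====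
-- DFA transition table _DELTA; missing transitions default to the dead state 2.
def vcDelta : PySem.Dict (Nat × String) Nat :=
  PySem.Dict.ofList [((0, "digit"), 0), ((0, "dot"), 1), ((1, "digit"), 1)]

-- `ch in "0123456789"` for a single char is exactly membership of that char.
def vcClassify (c : Char) : String :=
  if ("0123456789".toList).contains c then "digit"
  else if c = '.' then "dot"
  else "other"

-- the for-loop with its early `break` on the dead state
def vcRun : Nat → List Char → Nat
  | st, [] => st
  | st, c :: t =>
      let st' := PySem.Dict.getD vcDelta (st, vcClassify c) 2
      if st' = 2 then 2 else vcRun st' t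

def value_check_alt (value : String) : Bool :=
  if value == "x" then true
  else if value == "0" then false
  else decide (vcRun 0 value.toList ≠ 2)

-- ===== PRECONDITION & SPEC =====
def Spec_value_check (value : String) (out : Bool) : Prop := out = value_check_alt value
instance (value : String) (out : Bool) : Decidable (Spec_value_check value out) := by unfold Spec_value_check; infer_instance

-- ===== CLAIM (what is proved, stated in full; the proofs are below) =====
def Claim_equal_value_check : Prop := ∀ (value : String), Dom_value_check value → Spec_value_check value (value_check value)

-- ===== LEMMAS AND PROOFS =====

def pvDig (c : Char) : Bool := (['0','1','2','3','4','5','6','7','8','9'] : List Char).contains c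

theorem pv_digits_str : ("0123456789".toList) = (['0','1','2','3','4','5','6','7','8','9'] : List Char) := by decide

theorem pv_classify_digit (c : Char) (h : pvDig c = true) : vcClassify c = "digit" := by
  unfold vcClassify
  rw [pv_digits_str, show (['0','1','2','3','4','5','6','7','8','9'] : List Char).contains c
        = pvDig c from rfl, h]
  rfl

theorem pv_classify_dot : vcClassify '.' = "dot" := by decide

theorem pv_classify_other (c : Char) (hd : pvDig c = false) (hdot : c ≠ '.') : vcClassify c = "other" := by
  unfold vcClassify
  rw [pv_digits_str, show (['0','1','2','3','4','5','6','7','8','9'] : List Char).contains c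
        = pvDig c from rfl, hd]
  simp [hdot]

theorem pv_run1 (t : List Char) : vcRun 1 t = if t.all pvDig then 1 else 2 := by
  induction t with
  | nil => simp [vcRun]
  | cons c t ih =>
      rw [vcRun]
      cases hd : pvDig c
      · by_cases hdot : c = '.'
        · subst hdot
          rw [pv_classify_dot,
              show PySem.Dict.getD vcDelta (1, "dot") 2 = 2 from by decide]
          simp [hd]
        · rw [pv_classify_other c hd hdot,
              show PySem.Dict.getD vcDelta (1, "other") 2 = 2 from by decide]
          simp [hd]
      · rw [pv_classify_digit c hd,
            show PySem.Dict.getD vcDelta (1, "digit") 2 = 1 from by decide]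
        simp only [List.all_cons, hd, Bool.true_and]
        simpa using ih

theorem pv_run0 (cs : List Char) :
    (decide (vcRun 0 cs ≠ 2))
      = ((cs.takeWhile (fun c => c ≠ '.')).all pvDig
          && ((cs.dropWhile (fun c => c ≠ '.')).drop 1).all pvDig) := by
  induction cs with
  | nil => simp [vcRun]
  | cons c t ih =>
      rw [vcRun]
      by_cases hdot : c = '.'
      · subst hdot
        rw [pv_classify_dot,
            show PySem.Dict.getD vcDelta (0, "dot") 2 = 1 from by decide,
            if_neg (by decide : ¬ ((1:Nat) = 2)), pv_run1,
            List.takeWhile_cons, List.dropWhile_cons]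
        by_cases h : t.all pvDig = true
        · simp [h]
        · simp [Bool.eq_false_iff.mpr h]
      · have hp : (decide (c ≠ '.')) = true := by simp [hdot]
        cases hd : pvDig c
        · rw [pv_classify_other c hd hdot,
              show PySem.Dict.getD vcDelta (0, "other") 2 = 2 from by decide,
              if_pos rfl, List.takeWhile_cons, List.dropWhile_cons]
          simp [hp, hd]
        · rw [pv_classify_digit c hd,
              show PySem.Dict.getD vcDelta (0, "digit") 2 = 0 from by decide,
              if_neg (by decide : ¬ ((0:Nat) = 2)),
              List.takeWhile_cons, List.dropWhile_cons]
          simpa [hp, hd] using ih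

theorem pv_replace_go (fuel : Nat) :
    ∀ (l acc : List Char), l.length ≤ fuel →
      PySem.Chars.replace.go ['.'] [] fuel l acc = acc.reverse ++ l.filter (fun c => c ≠ '.') := by
  induction fuel with
  | zero =>
      intro l acc h
      have : l = [] := List.eq_nil_of_length_eq_zero (Nat.le_zero.mp h)
      subst this
      simp [PySem.Chars.replace.go]
  | succ n ih =>
      intro l acc h
      cases l with
      | nil => simp [PySem.Chars.replace.go]
      | cons c t =>
          rw [PySem.Chars.replace.go]
          by_cases hc : c = '.'
          · subst hc
            have hp : (['.'] : List Char).isPrefixOf ('.' :: t) = true := by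
              simp [List.isPrefixOf]
            simp only [hp, if_true]
            rw [show List.drop (['.'] : List Char).length ('.' :: t) = t from rfl,
                show ([] : List Char).reverse ++ acc = acc from rfl,
                ih t acc (by simpa using Nat.le_of_succ_le_succ h)]
            simp
          · have hp : (['.'] : List Char).isPrefixOf (c :: t) = false := by
              simp [List.isPrefixOf]
              intro h'; exact hc h'.symm
            simp only [hp, Bool.false_eq_true, if_false]
            rw [ih t (c :: acc) (by simpa using Nat.le_of_succ_le_succ h)]
            simp [hc]

theorem pv_replace_dot (cs : List Char) :
    PySem.Chars.replace cs ['.'] [] = cs.filter (fun c => c ≠ '.') := by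
  rw [PySem.Chars.replace, if_neg (by simp)]
  exact pv_replace_go cs.length cs [] le_rfl

theorem pv_count_go (fuel : Nat) :
    ∀ (l : List Char) (acc : Nat), l.length ≤ fuel →
      PySem.Chars.count.go ['.'] fuel l acc = acc + l.count '.' := by
  induction fuel with
  | zero =>
      intro l acc h
      have : l = [] := List.eq_nil_of_length_eq_zero (Nat.le_zero.mp h)
      subst this
      simp [PySem.Chars.count.go]
  | succ n ih =>
      intro l acc h
      cases l with
      | nil => simp [PySem.Chars.count.go]
      | cons c t =>
          rw [PySem.Chars.count.go]
          by_cases hc : c = '.'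
          · subst hc
            have hp : (['.'] : List Char).isPrefixOf ('.' :: t) = true := by
              simp [List.isPrefixOf]
            simp only [hp, if_true]
            rw [show List.drop (['.'] : List Char).length ('.' :: t) = t from rfl,
                ih t (acc + 1) (by simpa using Nat.le_of_succ_le_succ h)]
            rw [List.count_cons]
            simp
            omega
          · have hp : (['.'] : List Char).isPrefixOf (c :: t) = false := by
              simp [List.isPrefixOf]
              intro h'; exact hc h'.symm
            simp only [hp, Bool.false_eq_true, if_false]
            rw [ih t acc (by simpa using Nat.le_of_succ_le_succ h)]
            rw [List.count_cons]
            simp [hc]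

theorem pv_count_dot (cs : List Char) :
    PySem.Chars.count cs ['.'] = cs.count '.' := by
  rw [PySem.Chars.count, if_neg (by simp)]
  rw [pv_count_go cs.length cs 0 le_rfl]
  omega

theorem pv_foldl_flag (l : List Char) :
    ∀ (b : Bool), l.foldl (fun b c => if pvDig c then b else true) b = (b || !(l.all pvDig)) := by
  induction l with
  | nil => intro b; simp
  | cons c t ih =>
      intro b
      simp only [List.foldl_cons, List.all_cons]
      rw [ih]
      by_cases h : pvDig c = true <;> simp [h]

theorem pv_nodot_all (cs : List Char) :
    ((cs.filter (fun c => c ≠ '.')).all pvDig && (cs.count '.' == 0)) = cs.all pvDig := by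
  induction cs with
  | nil => simp
  | cons c t ih =>
      by_cases h : c = '.'
      · subst h
        rw [List.filter_cons, List.count_cons, List.all_cons,
            show pvDig '.' = false from rfl]
        simp
      · have hc1 : (decide (c ≠ '.')) = true := by simp [h]
        have hc2 : (c == '.') = false := by simp [h]
        rw [List.filter_cons, List.count_cons, List.all_cons]
        simp only [hc1, if_true, hc2, Bool.false_eq_true, if_false, Nat.add_zero, List.all_cons]
        cases hd : pvDig c
        · simp
        · simpa using ih

theorem pv_main (cs : List Char) :
    ((cs.filter (fun c => c ≠ '.')).all pvDig && (cs.count '.' == 0 || cs.count '.' == 1))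
      = ((cs.takeWhile (fun c => c ≠ '.')).all pvDig
          && ((cs.dropWhile (fun c => c ≠ '.')).drop 1).all pvDig) := by
  induction cs with
  | nil => simp
  | cons c t ih =>
      by_cases h : c = '.'
      · subst h
        have hcd : (decide (('.' : Char) ≠ '.')) = false := by decide
        have e1 : (t.count '.' + 1 == 0) = false := by
          rw [Bool.eq_false_iff]
          simp
        have e2 : (t.count '.' + 1 == 1) = (t.count '.' == 0) := by
          rw [Bool.eq_iff_iff]
          simp only [beq_iff_eq]
          omega
        rw [List.filter_cons, List.count_cons, List.takeWhile_cons, List.dropWhile_cons]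
        simp only [hcd, Bool.false_eq_true, if_false,
          show (('.' : Char) == '.') = true from by decide, if_true, e1, e2,
          Bool.false_or, List.drop_succ_cons, List.drop_zero, List.all_nil, Bool.true_and]
        exact pv_nodot_all t
      · have hc1 : (decide (c ≠ '.')) = true := by simp [h]
        have hc2 : (c == '.') = false := by simp [h]
        rw [List.filter_cons, List.count_cons, List.takeWhile_cons, List.dropWhile_cons]
        simp only [hc1, if_true, hc2, Bool.false_eq_true, if_false, Nat.add_zero, List.all_cons]
        cases hd : pvDig c
        · simp
        · simp only [Bool.true_and]
          exact ih

-- ===== VERDICT (by name: the statement is the Claim_ definition above) =====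
theorem value_check_spec : Claim_equal_value_check := by
  intro value _
  unfold Spec_value_check value_check value_check_alt
  by_cases hx : value = "x"
  · subst hx; decide
  · by_cases h0 : value = "0"
    · subst h0; decide
    · have hx' : (value == "x") = false := beq_eq_false_iff_ne.mpr hx
      have h0' : (value == "0") = false := beq_eq_false_iff_ne.mpr h0
      have e1 : (".":String).toList = ['.'] := by decide
      have e2 : ("":String).toList = [] := by decide
      simp only [PySem.Str.toList_replace, PySem.Str.count_eq, e1, e2, hx', h0',
        Bool.false_eq_true, if_false]
      rw [pv_replace_dot, pv_count_dot, pv_run0]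
      rw [show (fun (b : Bool) (c : Char) =>
            if (['0','1','2','3','4','5','6','7','8','9'] : List Char).contains c then b else true)
          = (fun (b : Bool) (c : Char) => if pvDig c then b else true) from rfl]
      rw [pv_foldl_flag]
      have hcc : (([0, 1] : List Nat).contains (value.toList.count '.'))
          = (value.toList.count '.' == 0 || value.toList.count '.' == 1) := by
        rw [Bool.eq_iff_iff]
        simp
      rw [hcc]
      have key := pv_main value.toList
      simp only [Bool.false_or, Bool.or_false]
      by_cases hor : (value.toList.count '.' == 0 || value.toList.count '.' == 1) = true
      · rw [hor] at key
        simp only [hor, if_true, Bool.and_true] at key ⊢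
        rw [← key]
        cases hall : (value.toList.filter (fun c => c ≠ '.')).all pvDig <;> simp
      · have hor' := Bool.eq_false_iff.mpr hor
        rw [hor'] at key
        simp only [Bool.and_false] at key
        simp only [hor', Bool.false_eq_true, if_false]
        rw [← key]
        decide
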